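-- pv_equiv track=rewrite | github.com/ldct/cp | GCJ/2014/qualification/d/d.py | count_kn
-- ===== SOURCE A (Python) =====
-- def count_kn(ranking):
--     unmatched_k = 0
--     kn = 0
--     for (_, player) in reversed(ranking):
--         if player == 'ken':
--             unmatched_k += 1
--         else:
--             if unmatched_k > 0:
--                 unmatched_k -= 1
--                 kn += 1
--     return kn
-- ===== SOURCE B (Python) =====
-- def count_kn(ranking):
--     # Closed-form via prefix sums: the greedy match count equals
--     # (#kens) - max prefix excess of kens over opponents (the excess floored at 0
--     # by the leading 0 in the prefix list).
--     deltas = [1 if player == 'ken' else -1 for (_, player) in ranking]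
--     prefix = [0]
--     s = 0
--     for d in deltas:
--         s += d
--         prefix.append(s)
--     kens = deltas.count(1)
--     return kens - max(prefix)
-- ===== Notes on version B (the rewrite author's own statement) =====
-- stated objective: alternative
-- what changed: Replaces A's reversed greedy matching loop with a staged prefix-sum formula: map the ranking to +1/-1 deltas, build the prefix-sum list, and return #kens minus the maximum prefix sum (the maximal unmatchable ken excess).
import Mathlib
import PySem

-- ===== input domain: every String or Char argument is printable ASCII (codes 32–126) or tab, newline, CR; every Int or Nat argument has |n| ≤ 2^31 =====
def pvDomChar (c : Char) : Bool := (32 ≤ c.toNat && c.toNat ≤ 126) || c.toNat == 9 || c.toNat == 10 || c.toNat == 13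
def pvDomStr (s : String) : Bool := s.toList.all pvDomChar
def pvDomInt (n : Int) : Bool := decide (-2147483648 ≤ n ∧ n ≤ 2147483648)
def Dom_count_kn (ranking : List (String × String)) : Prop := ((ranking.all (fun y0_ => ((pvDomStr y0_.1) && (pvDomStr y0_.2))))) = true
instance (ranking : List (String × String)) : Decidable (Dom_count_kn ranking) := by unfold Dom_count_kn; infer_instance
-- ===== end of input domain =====

-- ===== PORT A =====
-- B replaces A's reversed greedy-matching loop by a staged prefix-sum formula:
-- map to +1/-1 deltas, build the prefix-sum list, return #kens - max(prefix sums).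

-- one loop step of A: state (unmatched_k, kn), iterating reversed(ranking)
def pvStepA (st : Int × Int) (pr : String × String) : Int × Int :=
  if pr.2 = "ken" then (st.1 + 1, st.2)
  else if st.1 > 0 then (st.1 - 1, st.2 + 1) else st

def count_kn (ranking : List (String × String)) : Int :=
  (ranking.reverse.foldl pvStepA (0, 0)).2

-- ===== PORT B =====
-- one loop step of B's prefix loop: state (prefix list, running sum s)
def pvStepB (st : List Int × Int) (d : Int) : List Int × Int :=
  (st.1 ++ [st.2 + d], st.2 + d)

def count_kn_alt (ranking : List (String × String)) : Int :=
  let deltas := ranking.map (fun pr => if pr.2 = "ken" then (1 : Int) else -1)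
  let prefixSums := (deltas.foldl pvStepB ([0], 0)).1
  let kens : Int := deltas.count 1
  -- prefixSums starts with 0 so it is never empty; max? is always some, getD makes it total
  kens - ((PySem.List.max? prefixSums (fun x => x)).getD 0)
-- ===== PRECONDITION & SPEC =====
def Spec_count_kn (ranking : List (String × String)) (out : Int) : Prop := out = count_kn_alt ranking
instance (ranking : List (String × String)) (out : Int) : Decidable (Spec_count_kn ranking out) := by unfold Spec_count_kn; infer_instance

-- ===== CLAIM (what is proved, stated in full; the proofs are below) =====
def Claim_equal_count_kn : Prop := ∀ (ranking : List (String × String)), Dom_count_kn ranking → Spec_count_kn ranking (count_kn ranking)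

-- ===== LEMMAS AND PROOFS =====

-- the delta list both sides are (implicitly) about
def pvDeltas (l : List (String × String)) : List Int :=
  l.map (fun pr => if pr.2 = "ken" then (1 : Int) else -1)

-- max prefix sum (over all prefixes, including the empty one) of a delta list
def pvE : List Int → Int
  | [] => 0
  | d :: ds => max 0 (d + pvE ds)

theorem pvE_nonneg (ds : List Int) : 0 ≤ pvE ds := by
  cases ds <;> simp [pvE]

-- A's fold over the reversed list, as a foldr
def pvG (l : List (String × String)) : Int × Int :=
  l.foldr (fun x st => pvStepA st x) (0, 0)

theorem pvG_eq_A (l : List (String × String)) :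
    l.reverse.foldl pvStepA (0, 0) = pvG l := by
  simp [pvG, List.foldl_reverse]

-- characterisation of A's state: unmatched = max prefix excess, kn = #kens - that excess
theorem pvG_char (l : List (String × String)) :
    pvG l = (pvE (pvDeltas l), ((pvDeltas l).count 1 : Int) - pvE (pvDeltas l)) := by
  induction l with
  | nil => simp [pvG, pvDeltas, pvE]
  | cons x t ih =>
    have hE := pvE_nonneg (pvDeltas t)
    have hc : pvG (x :: t) = pvStepA (pvG t) x := rfl
    rw [hc, ih]
    by_cases hk : x.2 = "ken"
    · have hd : pvDeltas (x :: t) = 1 :: pvDeltas t := by simp [pvDeltas, hk]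
      have hE1 : pvE (1 :: pvDeltas t) = 1 + pvE (pvDeltas t) := by
        show max 0 (1 + pvE (pvDeltas t)) = 1 + pvE (pvDeltas t)
        rw [max_eq_right (by omega)]
      have hcnt : List.count 1 ((1 : Int) :: pvDeltas t) = List.count 1 (pvDeltas t) + 1 := by
        simp
      simp only [pvStepA, hk, if_true, hd, hE1, hcnt]
      rw [Prod.mk.injEq]
      refine ⟨by omega, by push_cast; omega⟩
    · have hd : pvDeltas (x :: t) = -1 :: pvDeltas t := by simp [pvDeltas, hk]
      have hcnt : List.count 1 ((-1 : Int) :: pvDeltas t) = List.count 1 (pvDeltas t) := by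
        simp
      have hE2 : pvE (-1 :: pvDeltas t) = max 0 (-1 + pvE (pvDeltas t)) := rfl
      simp only [pvStepA, hk, if_false, hd, hcnt, hE2]
      split_ifs with h
      · have hmax : max 0 (-1 + pvE (pvDeltas t)) = pvE (pvDeltas t) - 1 := by
          rw [max_eq_right (by omega)]; ring
        rw [hmax, Prod.mk.injEq]
        refine ⟨by omega, by omega⟩
      · have hmax : max 0 (-1 + pvE (pvDeltas t)) = 0 := by
          rw [max_eq_left (by omega)]
        rw [hmax, Prod.mk.injEq]
        refine ⟨by omega, by omega⟩

-- B's prefix-sum list, as structural recursion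
def pvSums (s : Int) : List Int → List Int
  | [] => []
  | d :: ds => (s + d) :: pvSums (s + d) ds

theorem pvFoldB (ds : List Int) : ∀ acc s,
    (ds.foldl pvStepB (acc, s)).1 = acc ++ pvSums s ds := by
  induction ds with
  | nil => intro acc s; simp [pvSums]
  | cons d t ih =>
    intro acc s
    simp only [List.foldl_cons, pvStepB, pvSums]
    rw [ih]
    simp

theorem pvFoldMax (ds : List Int) : ∀ a s : Int, s ≤ a →
    (pvSums s ds).foldl max a = max a (s + pvE ds) := by
  induction ds with
  | nil =>
    intro a s h
    show a = max a (s + pvE [])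
    have : s + pvE [] = s := by simp [pvE]
    rw [this, max_eq_left h]
  | cons d t ih =>
    intro a s h
    have hE := pvE_nonneg t
    simp only [pvSums, List.foldl_cons]
    rw [ih (max a (s + d)) (s + d) (le_max_right _ _)]
    have hE2 : pvE (d :: t) = max 0 (d + pvE t) := rfl
    rw [hE2]
    by_cases h1 : 0 ≤ d + pvE t
    · rw [max_eq_right h1, max_assoc]
      congr 1
      rw [max_eq_right (by omega)]
      ring
    · rw [max_eq_left (show s + d ≤ a by omega)]
      rw [max_eq_left (show d + pvE t ≤ 0 by omega), add_zero, max_eq_left h,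
          max_eq_left (show s + d + pvE t ≤ a by omega)]

-- ===== VERDICT (by name: the statement is the Claim_ definition above) =====
theorem count_kn_spec : Claim_equal_count_kn := by
  intro ranking _
  unfold Spec_count_kn count_kn count_kn_alt
  rw [pvG_eq_A, pvG_char]
  show ((pvDeltas ranking).count 1 : Int) - pvE (pvDeltas ranking)
      = ((pvDeltas ranking).count 1 : Int)
        - ((PySem.List.max? ((pvDeltas ranking).foldl pvStepB ([0], 0)).1 (fun x => x)).getD 0)
  have h1 : ((pvDeltas ranking).foldl pvStepB ([0], 0)).1 = 0 :: pvSums 0 (pvDeltas ranking) := by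
    rw [pvFoldB]; rfl
  rw [h1, PySem.List.max?_id_cons, Option.getD_some,
      pvFoldMax (pvDeltas ranking) 0 0 le_rfl, zero_add,
      max_eq_right (pvE_nonneg (pvDeltas ranking))]
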